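-- pv_equiv track=rewrite | github.com/alyalsayed/Problem-Solving | Leetcode/Random/Easy/2423. Remove Letter To Equalize Frequency/Solution.py | equalFrequency
-- ===== SOURCE A (Python) =====
-- from collections import Counter
--
-- def equalFrequency(word: str) -> bool:
--     # If all characters in the word are distinct, then it is not possible to remove a character
--     if len(word) == len(set(word)):
--         return True
--
--     # Convert the string to a list to be able to remove elements from it
--     word_list = list(word)
--
--     # Iterate through each  character in the list and try removing the character
--     for index, char in enumerate(word_list):
--         # If the character occurs more than once in the word, remove it and check if the frequencies are equal
--         if word_list.count(char) > 0:
--             word_list.pop(index)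
--             freq_values = Counter(word_list).values()
--             if len(set(freq_values)) == 1:
--                 return True
--             else:
-- # If the frequencies are not equal, insert the character back and try the next character
--                 word_list.insert(index, char)
--
--     # If no character can be removed to make the frequencies equal, return False
--     return False
-- ===== SOURCE B (Python) =====
-- from collections import Counter
--
-- def equalFrequency(word: str) -> bool:
--     cnt = Counter(word)
--     for c in cnt:
--         vals = [v - (1 if k == c else 0) for k, v in cnt.items()]
--         if len({v for v in vals if v > 0}) <= 1:
--             return True
--     return False
-- ===== Notes on version B (the rewrite author's own statement) =====
-- stated objective: faster
-- what changed: Instead of popping each index out of a list and rebuilding a Counter per index (O(n) candidates x O(n) work), B builds one Counter and, for each distinct character, tests the decremented frequency multiset over the distinct keys only (O(n + k^2) for k distinct characters).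
-- outside the precondition, e.g. on equalFrequency(''): A returns True, B returns False
import Mathlib
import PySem

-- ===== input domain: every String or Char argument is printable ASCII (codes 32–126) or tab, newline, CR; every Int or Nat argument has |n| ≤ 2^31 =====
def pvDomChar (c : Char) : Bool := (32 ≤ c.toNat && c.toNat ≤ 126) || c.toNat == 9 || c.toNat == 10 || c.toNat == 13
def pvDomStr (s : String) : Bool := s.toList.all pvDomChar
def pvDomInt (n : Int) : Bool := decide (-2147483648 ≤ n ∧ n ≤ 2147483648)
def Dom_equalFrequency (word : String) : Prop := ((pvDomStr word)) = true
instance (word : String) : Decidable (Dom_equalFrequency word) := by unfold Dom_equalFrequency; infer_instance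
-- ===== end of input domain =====

-- B replaces A's per-index pop/re-count scan by one Counter probed per distinct character (faster).

-- ===== PORT A =====
-- inner check: len(set(Counter(lst).values())) == 1
def pvCheckA (lst : List Char) : Bool :=
  PySem.Set.len (PySem.Set.ofList ((PySem.Dict.counter lst).values)) == 1

-- the for-loop over enumerate(word_list); the list is restored by insert before the next
-- iteration, so iterating a pre-computed enumerate snapshot is exact for Python's live iterator
def pvLoopA (wl : List Char) (pairs : List (Int × Char)) : Bool :=
  match pairs with
  | [] => false
  | (index, ch) :: rest =>
    if (PySem.List.count wl ch : Int) > 0 then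
      match PySem.List.pop? wl index with
      | none => false   -- unreachable: enumerate indices are in range
      | some (_, popped) =>
        if pvCheckA popped then true
        else pvLoopA (PySem.List.insert popped index ch) rest
    else pvLoopA wl rest

def equalFrequency (word : String) : Bool :=
  if PySem.Str.len word == PySem.Set.len (PySem.Set.ofList word.toList) then true
  else pvLoopA word.toList (PySem.List.enumerate word.toList 0)

-- ===== PORT B =====
-- one candidate: decrement c's count over the items, keep positive values, ≤ 1 distinct
def pvTryB (items : List (Char × Int)) (c : Char) : Bool :=
  decide (PySem.Set.len (PySem.Set.ofList
    (((items.map (fun p => p.2 - (if p.1 == c then 1 else 0))).filter (fun v => decide (0 < v))))) ≤ 1)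

def equalFrequency_alt (word : String) : Bool :=
  let cnt := PySem.Dict.counter word.toList
  cnt.keys.any (fun c => pvTryB cnt.items c)

-- ===== PRECONDITION & SPEC =====
-- Pre_ excludes only the empty string, an unspecified corner on which A's all-distinct shortcut
-- returns True while B, which tries each character that is present, naturally returns False; both are defensible.
def Pre_equalFrequency (word : String) : Prop := word.toList ≠ []
instance (word : String) : Decidable (Pre_equalFrequency word) := by unfold Pre_equalFrequency; infer_instance
def pvWitness_equalFrequency : String := "aabb"

def Spec_equalFrequency (word : String) (out : Bool) : Prop := out = equalFrequency_alt word
instance (word : String) (out : Bool) : Decidable (Spec_equalFrequency word out) := by unfold Spec_equalFrequency; infer_instance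

-- ===== CLAIM (what is proved, stated in full; the proofs are below) =====
def Claim_equal_equalFrequency : Prop := ∀ (word : String), Dom_equalFrequency word → Pre_equalFrequency word → Spec_equalFrequency word (equalFrequency word)

-- ===== LEMMAS AND PROOFS =====

theorem pv_toFinset_ofList {α : Type} [BEq α] [LawfulBEq α] [DecidableEq α] (l : List α) :
    (PySem.Set.ofList l).toFinset = l.toFinset := by ext x; simp [PySem.Set.mem_ofList]

theorem pv_len_ofList {α : Type} [BEq α] [LawfulBEq α] [DecidableEq α] (l : List α) :
    PySem.Set.len (PySem.Set.ofList l) = (l.toFinset.card : Int) := by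
  show ((PySem.Set.ofList l).length : Int) = _
  rw [← List.toFinset_card_of_nodup (PySem.Set.nodup_ofList l), pv_toFinset_ofList]

-- the Finset of candidate frequency values B inspects for character c
def pvBSet (wl : List Char) (c : Char) : Finset Int :=
  (wl.toFinset.image (fun k => (wl.count k : Int) - (if k = c then 1 else 0))).filter (fun v => 0 < v)

theorem pvTryB_iff (wl : List Char) (c : Char) :
    pvTryB (PySem.Dict.counter wl).items c = true ↔ (pvBSet wl c).card ≤ 1 := by
  unfold pvTryB
  rw [decide_eq_true_iff, PySem.Dict.items_counter, List.map_map, pv_len_ofList,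
      List.toFinset_filter]
  have hset : {x ∈ (List.map ((fun p => p.2 - if (p.1 == c) = true then 1 else 0)
        ∘ fun k => ((k : Char), (List.count k wl : Int))) (PySem.Set.ofList wl)).toFinset |
        decide (0 < x) = true} = pvBSet wl c := by
    ext v
    simp [pvBSet, PySem.Set.mem_ofList, Function.comp]
  rw [hset]
  exact_mod_cast Iff.rfl

theorem pvCheckA_iff (lst : List Char) :
    pvCheckA lst = true ↔ (lst.toFinset.image (fun x => (lst.count x : Int))).card = 1 := by
  unfold pvCheckA
  have hv : (PySem.Dict.counter lst).values = (PySem.Dict.counter lst).items.map Prod.snd := rfl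
  rw [hv, PySem.Dict.items_counter, List.map_map, pv_len_ofList]
  have hset : (List.map (Prod.snd ∘ fun k => ((k : Char), (List.count k lst : Int)))
      (PySem.Set.ofList lst)).toFinset = lst.toFinset.image (fun x => (lst.count x : Int)) := by
    ext v
    simp [PySem.Set.mem_ofList, Function.comp]
  rw [hset, beq_iff_eq]
  exact_mod_cast Iff.rfl

theorem pv_erase_count (wl : List Char) (k : Nat) (h : k < wl.length) (x : Char) :
    ((wl.eraseIdx k).count x : Int) = (wl.count x : Int) - (if x = wl[k] then 1 else 0) := by
  obtain ⟨c, hc⟩ : ∃ c, wl[k] = c := ⟨_, rfl⟩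
  rw [hc, List.eraseIdx_eq_take_drop_succ]
  conv_rhs => rw [← List.take_append_drop k wl, ← List.getElem_cons_drop h, hc]
  simp [List.count_append, List.count_cons]
  by_cases hx : x = c
  · simp [hx]; omega
  · simp [hx]; exact fun e => hx e.symm

theorem pv_erase_toFinset (wl : List Char) (k : Nat) (h : k < wl.length) :
    (wl.eraseIdx k).toFinset =
      wl.toFinset.filter (fun x => 0 < (wl.count x : Int) - (if x = wl[k] then 1 else 0)) := by
  ext x
  simp only [List.mem_toFinset, Finset.mem_filter]
  rw [← pv_erase_count wl k h x]
  constructor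
  · intro hx
    refine ⟨List.mem_of_mem_eraseIdx hx, ?_⟩
    exact_mod_cast List.count_pos_iff.mpr hx
  · rintro ⟨-, hpos⟩
    exact List.count_pos_iff.mp (by exact_mod_cast hpos)

theorem pv_ASet_eq_BSet (wl : List Char) (k : Nat) (h : k < wl.length) :
    ((wl.eraseIdx k).toFinset.image (fun x => ((wl.eraseIdx k).count x : Int))) = pvBSet wl (wl[k]) := by
  rw [pv_erase_toFinset wl k h]
  rw [Finset.image_congr (g := fun x => (wl.count x : Int) - (if x = wl[k] then 1 else 0))
      (fun x _ => pv_erase_count wl k h x)]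
  exact Eq.symm Finset.filter_image

theorem pv_restore (wl : List Char) (k : Nat) (h : k < wl.length) :
    PySem.List.insert (wl.eraseIdx k) (k : Int) (wl[k]) = wl := by
  have hlen : (wl.eraseIdx k).length = wl.length - 1 := by
    simp [List.length_eraseIdx, h]
  rw [PySem.List.insert_natCast _ _ _ (by omega)]
  rw [List.eraseIdx_eq_take_drop_succ]
  rw [List.take_append_of_le_length (by simp; omega), List.take_take, min_self,
      List.drop_append_of_le_length (by simp; omega)]
  simp

theorem pvLoopA_any (wl : List Char) (pairs : List (Int × Char))
    (hp : ∀ p ∈ pairs, ∃ (k : Nat) (h : k < wl.length), p = ((k : Int), wl[k])) :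
    pvLoopA wl pairs = pairs.any (fun p => pvCheckA (wl.eraseIdx p.1.toNat)) := by
  induction pairs with
  | nil => simp [pvLoopA]
  | cons hd tl ih =>
    obtain ⟨k, hk, hhd⟩ := hp hd List.mem_cons_self
    subst hhd
    show pvLoopA wl (((k : Int), wl[k]) :: tl) = _
    rw [pvLoopA]
    have hcnt : (0 : Int) < (PySem.List.count wl (wl[k]) : Int) := by
      rw [PySem.List.count_eq]
      exact_mod_cast List.count_pos_iff.mpr (List.getElem_mem hk)
    rw [if_pos hcnt, PySem.List.pop?_natCast wl k hk]
    simp only [List.any_cons, Int.toNat_natCast]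
    by_cases hc : pvCheckA (wl.eraseIdx k)
    · simp [hc]
    · rw [if_neg hc, pv_restore wl k hk, Bool.eq_false_iff.mpr hc, Bool.false_or]
      exact ih (fun p hp' => hp p (List.mem_cons_of_mem _ hp'))

theorem pv_alt_iff (word : String) :
    equalFrequency_alt word = true ↔
      ∃ c ∈ word.toList, pvTryB (PySem.Dict.counter word.toList).items c = true := by
  unfold equalFrequency_alt
  show ((PySem.Dict.counter word.toList).keys.any
    fun c => pvTryB (PySem.Dict.counter word.toList).items c) = true ↔ _
  rw [PySem.Dict.keys_counter, List.any_eq_true]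
  constructor
  · rintro ⟨c, hc, h⟩; exact ⟨c, (PySem.Set.mem_ofList _ c).mp hc, h⟩
  · rintro ⟨c, hc, h⟩; exact ⟨c, (PySem.Set.mem_ofList _ c).mpr hc, h⟩

-- ===== VERDICT (by name: the statement is the Claim_ definition above) =====
theorem equalFrequency_spec : Claim_equal_equalFrequency := by
  intro word _ hpre
  unfold Spec_equalFrequency
  obtain ⟨wl, hwl⟩ : ∃ wl, word.toList = wl := ⟨_, rfl⟩
  have hne : wl ≠ [] := hwl ▸ hpre
  unfold equalFrequency
  rw [hwl, PySem.Str.len_eq, hwl, pv_len_ofList]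
  by_cases hnd : wl.Nodup
  · -- all distinct: A's shortcut fires, and B's first candidate succeeds
    rw [if_pos (by rw [beq_iff_eq]; exact_mod_cast (List.toFinset_card_of_nodup hnd).symm)]
    symm
    rw [pv_alt_iff, hwl]
    refine ⟨wl.head hne, List.head_mem hne, (pvTryB_iff wl _).mpr ?_⟩
    have hsub : pvBSet wl (wl.head hne) ⊆ {1} := by
      intro v hv
      simp only [pvBSet, Finset.mem_filter, Finset.mem_image, List.mem_toFinset] at hv
      obtain ⟨⟨x, hx, hveq⟩, hvpos⟩ := hv
      rw [List.count_eq_one_of_mem hnd hx] at hveq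
      simp only [Finset.mem_singleton]
      by_cases hxc : x = wl.head hne <;> simp [hxc] at hveq <;> omega
    simpa using Finset.card_le_card hsub
  · -- a duplicate exists: A runs its loop; index-by-index it agrees with B's per-character test
    have hcard : wl.toFinset.card ≠ wl.length := by
      intro hceq
      apply hnd
      have hd : wl.dedup.length = wl.length := by
        rw [← List.card_toFinset]; exact hceq
      rw [← List.Sublist.eq_of_length (List.dedup_sublist wl) hd]
      exact List.nodup_dedup wl
    rw [if_neg (by rw [beq_iff_eq]; exact_mod_cast fun h => hcard (by exact_mod_cast h.symm))]
    have hlen2 : 2 ≤ wl.length := by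
      rcases wl with _ | ⟨a, _ | ⟨b, t⟩⟩
      · exact absurd rfl hne
      · exact absurd (List.nodup_singleton a) hnd
      · simp
    have hperk : ∀ (k : Nat) (h : k < wl.length),
        pvCheckA (wl.eraseIdx k) = pvTryB (PySem.Dict.counter wl).items (wl[k]) := by
      intro k h
      have hpos : 0 < (pvBSet wl (wl[k])).card := by
        rw [← pv_ASet_eq_BSet wl k h]
        have hlene : (wl.eraseIdx k).length = wl.length - 1 := by simp [List.length_eraseIdx, h]
        have hnonnil : wl.eraseIdx k ≠ [] := by
          intro hnil; rw [hnil] at hlene; simp at hlene; omega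
        exact Finset.card_pos.mpr (Finset.Nonempty.image
          ⟨(wl.eraseIdx k).head hnonnil, List.mem_toFinset.mpr (List.head_mem hnonnil)⟩ _)
      rw [Bool.eq_iff_iff, pvCheckA_iff, pvTryB_iff, pv_ASet_eq_BSet wl k h]
      omega
    rw [pvLoopA_any wl _ (by
      intro p hp
      obtain ⟨k, hk, hpe⟩ := (PySem.List.mem_enumerate_iff wl 0 p).mp hp
      exact ⟨k, hk, by simpa using hpe⟩)]
    rw [Bool.eq_iff_iff, List.any_eq_true, pv_alt_iff, hwl]
    constructor
    · rintro ⟨p, hp, hchk⟩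
      obtain ⟨k, hk, hpe⟩ := (PySem.List.mem_enumerate_iff wl 0 p).mp hp
      subst hpe
      simp only [zero_add, Int.toNat_natCast] at hchk
      exact ⟨wl[k], List.getElem_mem hk, by rw [← hperk k hk]; exact hchk⟩
    · rintro ⟨c, hc, htry⟩
      obtain ⟨k, hk, hck⟩ := List.mem_iff_getElem.mp hc
      refine ⟨((k : Int), wl[k]), ?_, ?_⟩
      · exact (PySem.List.mem_enumerate_iff wl 0 _).mpr ⟨k, hk, by simp⟩
      · simp only [Int.toNat_natCast]
        rw [hperk k hk, hck]
        exact htry
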